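-- pv_equiv track=rewrite | github.com/pypi-data/pypi-mirror-368 | packages/rdkx5-yolo-mapper/rdkx5_yolo_mapper-1.0.0-cp310-cp310-manylinux2014_x86_64.whl/horizon_tc_ui/verifier/compare.py | get_compare_file
-- ===== SOURCE A (Python) =====
-- def get_compare_file(files1: dict, files2: dict) -> tuple:
--     is_inversion = False
--     compare_file_list = []
--
--     if len(files1) > len(files2):
--         files1, files2 = files2, files1
--         is_inversion = True
--
--     for file_name in list(files1.keys()):
--         file_path = files2.get(file_name, None)
--         if file_path:
--             compare_file_list.append((files1[file_name], files2[file_name]))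
--             files1.pop(file_name)
--             files2.pop(file_name)
--
--     for file1_name in list(files1.keys()):
--         node_and_output_1_list = file1_name.split('.')[0].split('-to-')
--         if len(node_and_output_1_list) > 1:
--             output_name_1 = node_and_output_1_list[1]
--             for file2_name in list(files2.keys()):
--                 node_and_output_2_list = file2_name.split('.')[0].split('-to-')
--                 if len(node_and_output_2_list
--                        ) > 1 and output_name_1 == node_and_output_2_list[1]:
--                     compare_file_list.append(
--                         (files1[file1_name], files2[file2_name]))
--
--     return is_inversion, compare_file_list
-- ===== SOURCE B (Python) =====
-- def _output_name(file_name):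
--     parts = file_name.split('.')[0].split('-to-')
--     return parts[1] if len(parts) > 1 else None
--
--
-- def get_compare_file(files1: dict, files2: dict) -> tuple:
--     is_inversion = len(files1) > len(files2)
--     if is_inversion:
--         files1, files2 = files2, files1
--
--     # exact name matches (a falsy path in files2 does not count, as in A)
--     matched = [name for name in files1 if files2.get(name)]
--     compare_file_list = [(files1[name], files2[name]) for name in matched]
--     for name in matched:
--         files1.pop(name)
--         files2.pop(name)
--
--     # index the remaining files2 by parsed output name, keeping files2 order
--     index = {}
--     for name, path in files2.items():
--         out = _output_name(name)
--         if out is not None: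
--             index.setdefault(out, []).append(path)
--
--     for name, path in files1.items():
--         out = _output_name(name)
--         if out is not None:
--             for path2 in index.get(out, ()):
--                 compare_file_list.append((path, path2))
--
--     return is_inversion, compare_file_list
-- ===== Notes on version B (the rewrite author's own statement) =====
-- stated objective: faster
-- what changed: A's quadratic second pass (for every unmatched files1 key, rescan all files2 keys and re-split their names) is replaced by building, in one pass, a dict indexing the remaining files2 paths by parsed output name (keeping files2 order), so each files1 key does a single lookup; the exact-name pass likewise becomes a filter + map instead of a mutate-while-iterating loop.
import Mathlib
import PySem

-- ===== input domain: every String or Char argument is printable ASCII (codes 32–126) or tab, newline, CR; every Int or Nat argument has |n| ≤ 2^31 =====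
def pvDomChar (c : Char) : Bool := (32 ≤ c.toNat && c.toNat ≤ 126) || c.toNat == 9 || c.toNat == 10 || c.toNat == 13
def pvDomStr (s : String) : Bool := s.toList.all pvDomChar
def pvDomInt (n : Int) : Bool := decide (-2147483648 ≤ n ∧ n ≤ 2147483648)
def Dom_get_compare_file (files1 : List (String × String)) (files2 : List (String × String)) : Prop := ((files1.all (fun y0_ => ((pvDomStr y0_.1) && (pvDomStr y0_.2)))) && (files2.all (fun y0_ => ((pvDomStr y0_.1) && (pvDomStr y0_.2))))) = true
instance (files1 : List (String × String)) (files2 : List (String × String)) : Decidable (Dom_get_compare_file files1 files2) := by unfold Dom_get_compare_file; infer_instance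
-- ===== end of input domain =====

-- B re-implements A's quadratic suffix-matching pass with a one-pass index of files2
-- by parsed output name (objective: faster). Both Pythons pop the matched keys out of
-- the argument dicts in place (the same side effect); the theorems are about the return value.

-- shared helper: file_name.split('.')[0].split('-to-')  (both programs contain this code)
-- s.split(sep) with a non-empty literal separator: split? returns some; getD [] totalises
def pvParts (name : String) : List String :=
  (PySem.Str.split?
    (PySem.List.pyGetD ((PySem.Str.split? name ".").getD []) 0 "") "-to-").getD []

-- ===== PORT A =====
-- state of A's first loop: (files1, files2, compare_file_list)
def pvA_step1 (st : PySem.Dict String String × PySem.Dict String String × List (String × String))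
    (file_name : String) :
    PySem.Dict String String × PySem.Dict String String × List (String × String) :=
  let file_path := st.2.1.get? file_name          -- files2.get(file_name, None)
  if (file_path.getD "") != "" then               -- Python truthiness: None and "" are falsy
    (st.1.erase file_name, st.2.1.erase file_name,
      st.2.2 ++ [(st.1.getD file_name "", st.2.1.getD file_name "")])
  else st

-- A's second, nested loop (it does not mutate the dicts)
def pvA_pass2 (d1 d2 : PySem.Dict String String) (cmp : List (String × String)) :
    List (String × String) :=
  d1.keys.foldl (fun cmp file1_name =>
    let parts1 := pvParts file1_name
    if parts1.length > 1 then
      let output_name_1 := PySem.List.pyGetD parts1 1 ""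
      d2.keys.foldl (fun cmp file2_name =>
        let parts2 := pvParts file2_name
        if parts2.length > 1 && (output_name_1 == PySem.List.pyGetD parts2 1 "") then
          cmp ++ [(d1.getD file1_name "", d2.getD file2_name "")]
        else cmp) cmp
    else cmp) cmp

def get_compare_file (files1 : List (String × String)) (files2 : List (String × String)) :
    Bool × (List (String × String)) :=
  let d1 := PySem.Dict.mk files1
  let d2 := PySem.Dict.mk files2
  let is_inversion := decide (d1.size > d2.size)
  let (d1, d2) := if is_inversion then (d2, d1) else (d1, d2)
  let st := d1.keys.foldl pvA_step1 (d1, d2, [])  -- for file_name in list(files1.keys()): …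
  (is_inversion, pvA_pass2 st.1 st.2.1 st.2.2)

-- ===== PORT B =====
-- _output_name(file_name): parts[1] if there is an output suffix, else None
def pvOut? (name : String) : Option String :=
  let parts := pvParts name
  if parts.length > 1 then some (PySem.List.pyGetD parts 1 "") else none

-- index = {}; for name, path in files2.items(): index.setdefault(out, []).append(path)
def pvB_index (d2 : PySem.Dict String String) : PySem.Dict String (List String) :=
  d2.items.foldl (fun ix p =>
    match pvOut? p.1 with
    | some o => ix.modify o [] (· ++ [p.2])
    | none => ix) PySem.Dict.empty

-- for name, path in files1.items(): … for path2 in index.get(out, ()): append (path, path2)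
def pvB_pass2 (d1 : PySem.Dict String String) (ix : PySem.Dict String (List String))
    (cmp : List (String × String)) : List (String × String) :=
  d1.items.foldl (fun cmp p =>
    match pvOut? p.1 with
    | some o => cmp ++ (ix.getD o []).map (fun path2 => (p.2, path2))
    | none => cmp) cmp

def get_compare_file_alt (files1 : List (String × String)) (files2 : List (String × String)) :
    Bool × (List (String × String)) :=
  let d1 := PySem.Dict.mk files1
  let d2 := PySem.Dict.mk files2
  let is_inversion := decide (d1.size > d2.size)
  let (d1, d2) := if is_inversion then (d2, d1) else (d1, d2)
  let matched := d1.keys.filter (fun name => d2.getD name "" != "")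
  let cmp := matched.map (fun name => (d1.getD name "", d2.getD name ""))
  let popped := matched.foldl (fun (dd : _ × _) name => (dd.1.erase name, dd.2.erase name)) (d1, d2)
  (is_inversion, pvB_pass2 popped.1 (pvB_index popped.2) cmp)

-- ===== PRECONDITION & SPEC =====
-- Pre_ excludes association lists with duplicate keys: they do not represent the Python
-- dict arguments one-to-one (dict construction collapses duplicates), so the ports'
-- behaviour on them corresponds to no dict input of A.
def Pre_get_compare_file (files1 : List (String × String)) (files2 : List (String × String)) : Prop :=
  (files1.map Prod.fst).Nodup ∧ (files2.map Prod.fst).Nodup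
instance (files1 : List (String × String)) (files2 : List (String × String)) : Decidable (Pre_get_compare_file files1 files2) := by unfold Pre_get_compare_file; infer_instance

def pvWitness_get_compare_file : (List (String × String)) × (List (String × String)) :=
  ([("a.bin", "p1"), ("x-to-y.bin", "p2")], [("q-to-y.txt", "p3")])

def Spec_get_compare_file (files1 : List (String × String)) (files2 : List (String × String)) (out : Bool × (List (String × String))) : Prop := out = get_compare_file_alt files1 files2
instance (files1 : List (String × String)) (files2 : List (String × String)) (out : Bool × (List (String × String))) : Decidable (Spec_get_compare_file files1 files2 out) := by unfold Spec_get_compare_file; infer_instance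

-- ===== CLAIM (what is proved, stated in full; the proofs are below) =====
def Claim_equal_get_compare_file : Prop := ∀ (files1 : List (String × String)) (files2 : List (String × String)), Dom_get_compare_file files1 files2 → Pre_get_compare_file files1 files2 → Spec_get_compare_file files1 files2 (get_compare_file files1 files2)

-- ===== LEMMAS AND PROOFS =====

theorem pv_find?_filter_ne (l : List (String × String)) (k x : String) (h : x ≠ k) :
    List.find? (fun p => p.1 == x) (l.filter (fun p => !(p.1 == k))) =
      List.find? (fun p => p.1 == x) l := by
  induction l with
  | nil => rfl
  | cons a t ih =>
    by_cases hx : a.1 = x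
    · have hk : ¬ (a.1 == k) = true := by simp [hx]; exact h
      simp [List.filter_cons, List.find?_cons, hx, h]
    · by_cases hk : a.1 = k
      · simp [List.filter_cons, hk, ih, List.find?_cons, Ne.symm h]
      · simp [List.filter_cons, hk, List.find?_cons, hx, ih]

theorem pv_get?_erase_of_ne (d : PySem.Dict String String) (k x : String) (h : x ≠ k) :
    (d.erase k).get? x = d.get? x := by
  obtain ⟨l⟩ := d
  simp only [PySem.Dict.erase, PySem.Dict.get?, PySem.Dict.items]
  rw [pv_find?_filter_ne l k x h]

theorem pv_getD_erase_of_ne (d : PySem.Dict String String) (k x : String) (v : String)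
    (h : x ≠ k) : (d.erase k).getD x v = d.getD x v := by
  simp [PySem.Dict.getD_eq_get?_getD, pv_get?_erase_of_ne d k x h]

theorem pv_items_foldl_erase (ms : List String) :
    ∀ d : PySem.Dict String String,
      (ms.foldl PySem.Dict.erase d).items = d.items.filter (fun p => !ms.contains p.1) := by
  induction ms with
  | nil => intro d; simp
  | cons m ms ih =>
    intro d
    rw [List.foldl_cons, ih (d.erase m)]
    show List.filter _ (List.filter _ d.items) = _
    rw [List.filter_filter]
    apply List.filter_congr
    intro p _
    by_cases hpm : p.1 = m <;> simp [hpm, Bool.not_or, Bool.and_comm]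

theorem pv_nodup_keys_foldl_erase (ms : List String) (d : PySem.Dict String String)
    (h : d.keys.Nodup) : (ms.foldl PySem.Dict.erase d).keys.Nodup := by
  have hs : (ms.foldl PySem.Dict.erase d).keys.Sublist d.keys := by
    simpa [PySem.Dict.keys, pv_items_foldl_erase] using
      (List.filter_sublist (l := d.items) (p := fun p => !ms.contains p.1)).map Prod.fst
  exact h.sublist hs

-- A's first loop, characterised: it collects exactly the exact-name matches (computed
-- against the ORIGINAL dicts — key uniqueness makes the in-loop pops invisible to the
-- remaining iterations) and erases them from both dicts.
theorem pv_pass1_eq (ks : List String) :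
    ∀ (d1 d2 : PySem.Dict String String) (cmp : List (String × String)), ks.Nodup →
      ks.foldl pvA_step1 (d1, d2, cmp) =
        ((ks.filter (fun n => d2.getD n "" != "")).foldl PySem.Dict.erase d1,
         (ks.filter (fun n => d2.getD n "" != "")).foldl PySem.Dict.erase d2,
         cmp ++ (ks.filter (fun n => d2.getD n "" != "")).map
            (fun n => (d1.getD n "", d2.getD n ""))) := by
  induction ks with
  | nil => intro d1 d2 cmp _; simp
  | cons n ks ih =>
    intro d1 d2 cmp hnd
    have hn : n ∉ ks := (List.nodup_cons.mp hnd).1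
    have hks : ks.Nodup := (List.nodup_cons.mp hnd).2
    by_cases h : (d2.getD n "" != "") = true
    · have hstep : pvA_step1 (d1, d2, cmp) n =
          (d1.erase n, d2.erase n, cmp ++ [(d1.getD n "", d2.getD n "")]) := by
        simp [pvA_step1, ← PySem.Dict.getD_eq_get?_getD, h]
      have hfil : ks.filter (fun m => (d2.erase n).getD m "" != "") =
          ks.filter (fun m => d2.getD m "" != "") := by
        apply List.filter_congr
        intro m hm
        have : m ≠ n := fun e => hn (e ▸ hm)
        rw [pv_getD_erase_of_ne d2 n m "" this]
      have hmap : (ks.filter (fun m => d2.getD m "" != "")).map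
            (fun m => ((d1.erase n).getD m "", (d2.erase n).getD m "")) =
          (ks.filter (fun m => d2.getD m "" != "")).map
            (fun m => (d1.getD m "", d2.getD m "")) := by
        apply List.map_congr_left
        intro m hm
        have hmks : m ∈ ks := List.mem_of_mem_filter hm
        have hne : m ≠ n := fun e => hn (e ▸ hmks)
        rw [pv_getD_erase_of_ne d1 n m "" hne, pv_getD_erase_of_ne d2 n m "" hne]
      simp only [List.foldl_cons, hstep, ih (d1.erase n) (d2.erase n) _ hks, hfil, hmap,
        List.filter_cons, h, if_true]
      simp
    · have hb : ¬ (((d2.get? n).getD "") != "") = true := by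
        rw [show (d2.get? n).getD "" = d2.getD n "" from (PySem.Dict.getD_eq_get?_getD d2 n "").symm]
        exact h
      have hstep : pvA_step1 (d1, d2, cmp) n = (d1, d2, cmp) := by
        simp only [pvA_step1]
        exact if_neg hb
      rw [List.foldl_cons, hstep, ih d1 d2 cmp hks, List.filter_cons]
      simp [h]

-- Source B's single pop loop over (files1, files2) splits into two erase folds
theorem pv_pop_pair (ms : List String) :
    ∀ (d1 d2 : PySem.Dict String String),
      ms.foldl (fun (dd : _ × _) name => (dd.1.erase name, dd.2.erase name)) (d1, d2) =
        (ms.foldl PySem.Dict.erase d1, ms.foldl PySem.Dict.erase d2) := by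
  induction ms with
  | nil => intro d1 d2; rfl
  | cons m ms ih => intro d1 d2; simpa using ih (d1.erase m) (d2.erase m)

-- B's index, characterised per output name
theorem pv_index_getD (l : List (String × String)) :
    ∀ (ix : PySem.Dict String (List String)) (o : String),
      (l.foldl (fun ix p =>
          match pvOut? p.1 with
          | some o' => ix.modify o' [] (· ++ [p.2])
          | none => ix) ix).getD o [] =
        ix.getD o [] ++ l.filterMap (fun p => if pvOut? p.1 == some o then some p.2 else none) := by
  induction l with
  | nil => intro ix o; simp
  | cons p t ih =>
    intro ix o
    cases hpo : pvOut? p.1 with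
    | none => simp [List.foldl_cons, hpo, ih]
    | some o' =>
      simp only [List.foldl_cons, hpo, ih, List.filterMap_cons, PySem.Dict.getD_modify]
      by_cases he : o = o'
      · simp [he]
      · simp [he, Ne.symm he]

theorem pv_filterMap_pair (q : String → Option String) (l : List String)
    (g : String → String) (o : String) :
    List.filterMap
        ((fun p : String × String => if (q p.1 == some o) = true then some p.2 else none) ∘
          fun k => (k, g k)) l =
      (l.filter (fun k2 => q k2 == some o)).map g := by
  induction l with
  | nil => rfl
  | cons a t ih =>
    by_cases h : q a = some o
    · simpa [List.filterMap_cons, List.filter_cons, Function.comp, h] using ih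
    · simpa [List.filterMap_cons, List.filter_cons, Function.comp, h] using ih

theorem pv_hix (d2 : PySem.Dict String String) (h2 : d2.keys.Nodup) (o : String) :
    (pvB_index d2).getD o [] =
      (d2.keys.filter (fun k2 => pvOut? k2 == some o)).map (fun k2 => d2.getD k2 "") := by
  rw [pvB_index, pv_index_getD]
  rw [PySem.Dict.getD_empty, List.nil_append, PySem.Dict.items_eq_map_keys d2 h2 "",
    List.filterMap_map]
  exact pv_filterMap_pair pvOut? d2.keys (fun k2 => d2.getD k2 "") o

-- the two second passes agree on dicts with unique keys
theorem pv_pass2_eq (d1 d2 : PySem.Dict String String) (cmp : List (String × String))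
    (h1 : d1.keys.Nodup) (h2 : d2.keys.Nodup) :
    pvA_pass2 d1 d2 cmp = pvB_pass2 d1 (pvB_index d2) cmp := by
  unfold pvA_pass2 pvB_pass2
  rw [PySem.Dict.items_eq_map_keys d1 h1 "", List.foldl_map]
  apply PySem.List.foldl_congr_mem
  intro acc k _
  dsimp only
  cases hko : pvOut? k with
  | none =>
    have hngt : ¬ (pvParts k).length > 1 := by
      intro hgt; simp [pvOut?, hgt] at hko
    rw [if_neg hngt]
  | some o =>
    have hgt : (pvParts k).length > 1 := by
      by_contra hgt; simp [pvOut?, hgt] at hko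
    have ho : PySem.List.pyGetD (pvParts k) 1 "" = o := by
      simpa [pvOut?, hgt] using hko
    rw [if_pos hgt, ho, PySem.List.foldl_append_if]
    dsimp only
    have hfil : d2.keys.filter
          (fun file2_name => decide ((pvParts file2_name).length > 1) &&
            (o == PySem.List.pyGetD (pvParts file2_name) 1 "")) =
        d2.keys.filter (fun k2 => pvOut? k2 == some o) := by
      apply List.filter_congr
      intro k2 _
      by_cases hgt2 : (pvParts k2).length > 1
      · simp [pvOut?, hgt2, eq_comm]
      · simp [pvOut?, hgt2]
    rw [hfil, pv_hix d2 h2 o, List.map_map]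
    rfl

-- the whole post-swap computation agrees on dicts with unique keys
theorem pv_body_eq (d1 d2 : PySem.Dict String String)
    (h1 : d1.keys.Nodup) (h2 : d2.keys.Nodup) :
    (let st := d1.keys.foldl pvA_step1 (d1, d2, ([] : List (String × String)))
     pvA_pass2 st.1 st.2.1 st.2.2) =
    (let matched := d1.keys.filter (fun name => d2.getD name "" != "")
     let cmp := matched.map (fun name => (d1.getD name "", d2.getD name ""))
     let popped := matched.foldl
        (fun (dd : _ × _) name => (dd.1.erase name, dd.2.erase name)) (d1, d2)
     pvB_pass2 popped.1 (pvB_index popped.2) cmp) := by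
  rw [pv_pass1_eq d1.keys d1 d2 [] h1]
  dsimp only
  rw [pv_pop_pair, List.nil_append]
  dsimp only
  exact pv_pass2_eq _ _ _
    (pv_nodup_keys_foldl_erase _ d1 h1) (pv_nodup_keys_foldl_erase _ d2 h2)

-- ===== VERDICT (by name: the statement is the Claim_ definition above) =====
theorem get_compare_file_spec : Claim_equal_get_compare_file := by
  intro files1 files2 _ hpre
  obtain ⟨h1, h2⟩ := hpre
  have hk1 : (PySem.Dict.mk files1).keys.Nodup := by
    simpa [PySem.Dict.keys] using h1
  have hk2 : (PySem.Dict.mk files2).keys.Nodup := by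
    simpa [PySem.Dict.keys] using h2
  unfold Spec_get_compare_file get_compare_file get_compare_file_alt
  by_cases hsw : (PySem.Dict.mk files1).size > (PySem.Dict.mk files2).size
  · simp only [hsw, decide_true, if_true]
    exact congrArg (Prod.mk true) (pv_body_eq _ _ hk2 hk1)
  · simp only [hsw, decide_false, if_false]
    exact congrArg (Prod.mk false) (pv_body_eq _ _ hk1 hk2)
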